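-- pv_equiv track=rewrite | github.com/r-rathi/advent-of-code | 2025/day03/v2.py | max_k_digit_subsequence
-- ===== SOURCE A (Python) =====
-- def max_k_digit_subsequence(digits: list[int], k: int) -> list[int]:
--     """
--     Return the lexicographically maximum length-k subsequence of `digits`.
--
--     Select exactly k digits while preserving left-to-right order.
--     Greedy solution uses a monotonic decreasing stack and a drop budget.
--
--     Time:  O(n)
--     Space: O(n) worst-case auxiliary (O(k) returned)
--     """
--     n = len(digits)
--     if not (0 <= k <= n):
--         raise ValueError("k must be between 0 and len(digits)")
--     if k == 0:
--         return []
--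
--     drop = n - k
--     stack: list[int] = []
--
--     for d in digits:
--         while drop and stack and stack[-1] < d:
--             stack.pop()
--             drop -= 1
--         stack.append(d)
--
--     return stack[:k]
-- ===== SOURCE B (Python) =====
-- def max_k_digit_subsequence(digits: list[int], k: int) -> list[int]:
--     """
--     Return the lexicographically maximum length-k subsequence of `digits`.
--
--     Repeated window-max selection: the i-th output digit is the leftmost
--     maximum of digits[start : n-(k-i)+1] (leaving enough digits for the
--     rest), and the search resumes just after it.
--     """
--     n = len(digits)
--     if not (0 <= k <= n):
--         raise ValueError("k must be between 0 and len(digits)")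
--
--     result = []
--     start = 0
--     for i in range(k):
--         end = n - (k - i) + 1
--         best = start
--         for j in range(start + 1, end):
--             if digits[j] > digits[best]:
--                 best = j
--         result.append(digits[best])
--         start = best + 1
--     return result
-- ===== Notes on version B (the rewrite author's own statement) =====
-- stated objective: alternative
-- what changed: Replaced the single-pass monotonic-stack-with-drop-budget greedy by a recursive window-max selection: pick the leftmost maximum of digits[0:n-k+1] as the first output digit and recurse on the remaining suffix with k-1.
import Mathlib
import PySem

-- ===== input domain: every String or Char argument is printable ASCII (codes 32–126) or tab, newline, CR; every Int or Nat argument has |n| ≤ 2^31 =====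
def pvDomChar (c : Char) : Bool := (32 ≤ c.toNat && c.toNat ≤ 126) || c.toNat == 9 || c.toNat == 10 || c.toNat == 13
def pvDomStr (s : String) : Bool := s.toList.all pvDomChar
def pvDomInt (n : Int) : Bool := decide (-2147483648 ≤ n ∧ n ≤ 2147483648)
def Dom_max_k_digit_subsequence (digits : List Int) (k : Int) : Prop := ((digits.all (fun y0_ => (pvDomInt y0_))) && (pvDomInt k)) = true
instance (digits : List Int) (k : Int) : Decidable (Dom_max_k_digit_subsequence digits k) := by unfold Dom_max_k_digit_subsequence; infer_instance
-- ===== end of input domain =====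

-- B replaces A's monotonic-stack greedy by recursive leftmost-window-max selection (alternative
-- algorithm, same return values); on 0 ≤ k ≤ len(digits) both return, outside both raise ValueError.

-- ===== PORT A =====
-- the inner `while drop and stack and stack[-1] < d` loop (stack top is the list's last element)
def pvWhileA (d : Int) (stack : List Int) (drop : Int) : List Int × Int :=
  if h : drop ≠ 0 ∧ stack ≠ [] ∧ PySem.List.pyGetD stack (-1) 0 < d then
    pvWhileA d stack.dropLast (drop - 1)   -- stack.pop(); drop -= 1
  else (stack, drop)
termination_by stack.length
decreasing_by
  have : 0 < stack.length := List.length_pos_iff.mpr h.2.1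
  simp [List.length_dropLast]; omega

-- one iteration of `for d in digits` (pop loop, then `stack.append(d)`)
def pvStepA (st : List Int × Int) (d : Int) : List Int × Int :=
  ((pvWhileA d st.1 st.2).1 ++ [d], (pvWhileA d st.1 st.2).2)

def max_k_digit_subsequence (digits : List Int) (k : Int) : List Int :=
  let n : Int := digits.length
  if ¬ (0 ≤ k ∧ k ≤ n) then []          -- Python raises ValueError here; excluded by Pre_
  else if k = 0 then []
  else
    let res := digits.foldl pvStepA ([], n - k)
    res.1.take k.toNat                   -- stack[:k]

-- ===== PORT B =====
-- inner loop: `best = start; for j in range(start+1, end): if digits[j] > digits[best]: best = j`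
def pvBestFrom (digits : List Int) (start endv : Int) : Int :=
  (PySem.List.pyRange (start + 1) endv 1).foldl
    (fun best j =>
      if PySem.List.pyGetD digits j 0 > PySem.List.pyGetD digits best 0 then j else best) start

-- one iteration of `for i in range(k)` over the state (result, start)
def pvStepB (digits : List Int) (n k : Int) (st : List Int × Int) (i : Int) : List Int × Int :=
  let endv := n - (k - i) + 1
  let best := pvBestFrom digits st.2 endv
  (st.1 ++ [PySem.List.pyGetD digits best 0], best + 1)

def max_k_digit_subsequence_alt (digits : List Int) (k : Int) : List Int :=
  let n : Int := digits.length
  if ¬ (0 ≤ k ∧ k ≤ n) then []          -- Python raises ValueError here; excluded by Pre_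
  else ((PySem.List.pyRange 0 k 1).foldl (pvStepB digits n k) ([], 0)).1

-- ===== PRECONDITION & SPEC =====
-- Pre_ excludes exactly the inputs where the Python A raises ValueError (k < 0 or k > len(digits)).
def Pre_max_k_digit_subsequence (digits : List Int) (k : Int) : Prop :=
  0 ≤ k ∧ k ≤ digits.length

instance (digits : List Int) (k : Int) : Decidable (Pre_max_k_digit_subsequence digits k) := by
  unfold Pre_max_k_digit_subsequence; infer_instance

def pvWitness_max_k_digit_subsequence : List Int × Int := ([3, 1, 4, 1, 5], 3)

def Spec_max_k_digit_subsequence (digits : List Int) (k : Int) (out : List Int) : Prop :=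
  out = max_k_digit_subsequence_alt digits k
instance (digits : List Int) (k : Int) (out : List Int) : Decidable (Spec_max_k_digit_subsequence digits k out) := by unfold Spec_max_k_digit_subsequence; infer_instance

-- ===== CLAIM (what is proved, stated in full; the proofs are below) =====
def Claim_equal_max_k_digit_subsequence : Prop := ∀ (digits : List Int) (k : Int), Dom_max_k_digit_subsequence digits k → Pre_max_k_digit_subsequence digits k → Spec_max_k_digit_subsequence digits k (max_k_digit_subsequence digits k)

-- ===== LEMMAS AND PROOFS =====


-- proof-side recursive form of B: leftmost window max, then recurse on the suffix
def pvBestB (digits : List Int) (n k : Int) : Int :=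
  (PySem.List.pyRange 1 (n - k + 1) 1).foldl
    (fun best j =>
      if PySem.List.pyGetD digits j 0 > PySem.List.pyGetD digits best 0 then j else best) 0

def pvSelRec (digits : List Int) (k : Int) : List Int :=
  let n : Int := digits.length
  if ¬ (0 ≤ k ∧ k ≤ n) then []
  else if k = 0 then []
  else
    let best := pvBestB digits n k
    PySem.List.pyGetD digits best 0 ::
      pvSelRec (PySem.List.slice digits (some (best + 1)) none) (k - 1)
termination_by k.toNat
decreasing_by omega

-- Top-of-stack-first model of A's loop (stack reversed), used only in the proofs.
def popT (d : Int) : List Int → Int → List Int × Int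
  | [], b => ([], b)
  | t :: r, b => if b ≠ 0 ∧ t < d then popT d r (b - 1) else (t :: r, b)

def runT : List Int → List Int → Int → List Int × Int
  | [], r, b => (r, b)
  | d :: ys, r, b => runT ys (d :: (popT d r b).1) (popT d r b).2


-- pop returns a suffix of the stack
theorem pop_suffix (d : Int) (r : List Int) (b : Int) : (popT d r b).1 <:+ r := by
  induction r generalizing b with
  | nil => simp [popT]
  | cons t r ih =>
    simp only [popT]
    split
    · exact (ih (b - 1)).trans (List.suffix_cons t r)
    · exact List.suffix_refl _

-- budget bookkeeping: the budget drops by exactly the number of popped elements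
theorem pop_budget (d : Int) (r : List Int) (b : Int) :
    (popT d r b).2 = b - (((r.length : Int)) - ((popT d r b).1.length : Int)) := by
  induction r generalizing b with
  | nil => simp [popT]
  | cons t r ih =>
    simp only [popT]
    split
    · rw [ih (b - 1)]
      have hle : (popT d r (b - 1)).1.length ≤ r.length :=
        (pop_suffix d r (b - 1)).length_le
      simp only [List.length_cons]
      push_cast
      omega
    · simp

theorem pop_nonneg (d : Int) (r : List Int) (b : Int) (hb : 0 ≤ b) : 0 ≤ (popT d r b).2 := by
  induction r generalizing b with
  | nil => simpa [popT] using hb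
  | cons t r ih =>
    simp only [popT]
    split
    · next hc => exact ih (b - 1) (by omega)
    · exact hb

-- if everything on the stack is smaller than d and the budget suffices, all of it is popped
theorem pop_all (d : Int) (r : List Int) (b : Int)
    (hlt : ∀ x ∈ r, x < d) (hb : (r.length : Int) ≤ b) :
    popT d r b = ([], b - r.length) := by
  induction r generalizing b with
  | nil => simp [popT]
  | cons t r ih =>
    simp only [popT]
    rw [if_pos ⟨by simp at hb; omega, hlt t (by simp)⟩]
    rw [ih (b - 1) (fun x hx => hlt x (List.mem_cons_of_mem t hx)) (by simp at hb ⊢; omega)]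
    simp only [List.length_cons]
    push_cast
    ring_nf

-- prefix collapse: elements smaller than d that all fit in the budget vanish when d arrives
theorem run_prefix (d : Int) (xs : List Int) (ys r : List Int) (b : Int)
    (hxs : ∀ x ∈ xs, x < d) (hr : ∀ x ∈ r, x < d)
    (hb : ((xs.length : Int)) + ((r.length : Int)) ≤ b) :
    runT (xs ++ d :: ys) r b = runT ys [d] (b - xs.length - r.length) := by
  induction xs generalizing r b with
  | nil =>
    simp only [List.nil_append, runT]
    rw [pop_all d r b hr (by simp at hb; omega)]
    simp only [List.length_nil]
    norm_num
  | cons a as ih =>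
    simp only [List.cons_append, runT]
    have hsuff := pop_suffix a r b
    have hlen := hsuff.length_le
    have hbud := pop_budget a r b
    have hr' : ∀ y ∈ a :: (popT a r b).1, y < d := by
      intro y hy
      rcases List.mem_cons.mp hy with h | h
      · rw [h]; exact hxs a (by simp)
      · exact hr y (hsuff.subset h)
    have hb' : ((as.length : Int)) + (((a :: (popT a r b).1).length : Int)) ≤ (popT a r b).2 := by
      simp only [List.length_cons] at hb ⊢
      push_cast at hb ⊢
      omega
    rw [ih (a :: (popT a r b).1) (popT a r b).2
        (fun y hy => hxs y (List.mem_cons_of_mem a hy)) hr' hb']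
    congr 1
    simp only [List.length_cons]
    push_cast
    omega

-- the bottom element m is never popped when the budget cannot reach it
theorem pop_lock (d m : Int) (σ : List Int) (b : Int) (hb : 0 ≤ b)
    (hlock : m < d → b ≤ (σ.length : Int)) :
    popT d (σ ++ [m]) b = ((popT d σ b).1 ++ [m], (popT d σ b).2) := by
  induction σ generalizing b with
  | nil =>
    simp only [List.nil_append, popT]
    rw [if_neg]
    rintro ⟨hb0, hmd⟩
    have := hlock hmd
    simp at this
    omega
  | cons t σ ih =>
    by_cases hc : b ≠ 0 ∧ t < d
    · simp only [List.cons_append, popT, if_pos hc]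
      exact ih (b - 1) (by omega) (fun hmd => by have := hlock hmd; simp at this ⊢; omega)
    · simp only [List.cons_append, popT, if_neg hc]

-- every remaining element larger than m arrives with at most K-1 elements (itself included) left
def pvCond (m K : Int) : List Int → Prop
  | [] => True
  | d :: ys => (m < d → ((ys.length : Int)) + 1 ≤ K - 1) ∧ pvCond m K ys

theorem run_protect (m K : Int) (ys σ : List Int) (b : Int)
    (hb : 0 ≤ b) (hinv : b = ((ys.length : Int)) + ((σ.length : Int)) + 1 - K)
    (hc : pvCond m K ys) :
    runT ys (σ ++ [m]) b = ((runT ys σ b).1 ++ [m], (runT ys σ b).2) := by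
  induction ys generalizing σ b with
  | nil => simp [runT]
  | cons d ys ih =>
    simp only [runT]
    have hlock : m < d → b ≤ (σ.length : Int) := by
      intro hmd
      have := hc.1 hmd
      simp only [List.length_cons] at hinv
      push_cast at hinv this
      omega
    rw [pop_lock d m σ b hb hlock]
    have hassoc : d :: ((popT d σ b).1 ++ [m]) = (d :: (popT d σ b).1) ++ [m] := by
      simp
    rw [hassoc]
    have hlen := (pop_suffix d σ b).length_le
    have hbud := pop_budget d σ b
    exact ih (d :: (popT d σ b).1) (popT d σ b).2 (pop_nonneg d σ b hb)
      (by simp only [List.length_cons] at hinv ⊢; push_cast at hinv ⊢; omega) hc.2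

theorem cond_of_tail (m K : Int) (ys : List Int)
    (h : ∀ (p : Nat), p < ys.length → m < ys.getD p 0 → ((ys.length : Int)) - p ≤ K - 1) :
    pvCond m K ys := by
  induction ys with
  | nil => trivial
  | cons d ys ih =>
    constructor
    · intro hmd
      have := h 0 (by simp) (by simpa using hmd)
      simp only [List.length_cons] at this
      push_cast at this ⊢
      omega
    · apply ih
      intro p hp hm
      have := h (p + 1) (by simpa using Nat.succ_lt_succ hp) (by simpa using hm)
      simp only [List.length_cons] at this
      push_cast at this ⊢
      omega

-- leftmost maximum over the first W positions (indices as Ints, pyGetD access)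
def IsLMax (ds : List Int) (W j : Int) : Prop :=
  0 ≤ j ∧ j < W ∧
  (∀ i : Int, 0 ≤ i → i < W → PySem.List.pyGetD ds i 0 ≤ PySem.List.pyGetD ds j 0) ∧
  (∀ i : Int, 0 ≤ i → i < j → PySem.List.pyGetD ds i 0 < PySem.List.pyGetD ds j 0)

theorem argmax_aux (ds : List Int) (t : Nat) :
    IsLMax ds (1 + (t : Int))
      ((PySem.List.pyRange 1 (1 + (t : Int)) 1).foldl
        (fun best j =>
          if PySem.List.pyGetD ds j 0 > PySem.List.pyGetD ds best 0 then j else best) 0) := by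
  induction t with
  | zero =>
    rw [show (1 + ((0 : Nat) : Int)) = 1 by norm_num, PySem.List.pyRange_one_eq_nil (by norm_num)]
    simp only [List.foldl_nil]
    refine ⟨le_refl 0, by norm_num, ?_, ?_⟩
    · intro i h0 h1
      have : i = 0 := by omega
      rw [this]
    · intro i h0 h1; omega
  | succ t ih =>
    rw [show (1 + ((t + 1 : Nat) : Int)) = (1 + (t : Int)) + 1 by push_cast; ring,
        PySem.List.pyRange_one_succ_right (by omega), List.foldl_append,
        List.foldl_cons, List.foldl_nil]
    obtain ⟨h0, h1, h2, h3⟩ := ih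
    by_cases hgt : PySem.List.pyGetD ds (1 + (t : Int)) 0 >
        PySem.List.pyGetD ds ((PySem.List.pyRange 1 (1 + (t : Int)) 1).foldl
          (fun best j =>
            if PySem.List.pyGetD ds j 0 > PySem.List.pyGetD ds best 0 then j else best) 0) 0
    · rw [if_pos hgt]
      refine ⟨by omega, by omega, ?_, ?_⟩
      · intro i hi0 hi1
        by_cases hie : i = 1 + (t : Int)
        · rw [hie]
        · exact le_of_lt (lt_of_le_of_lt (h2 i hi0 (by omega)) hgt)
      · intro i hi0 hi1
        exact lt_of_le_of_lt (h2 i hi0 (by omega)) hgt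
    · rw [if_neg hgt]
      push_neg at hgt
      refine ⟨h0, by omega, ?_, h3⟩
      intro i hi0 hi1
      by_cases hie : i = 1 + (t : Int)
      · rw [hie]; exact hgt
      · exact h2 i hi0 (by omega)

theorem best_isLMax (ds : List Int) (n k : Int) (hW : 1 ≤ n - k + 1) :
    IsLMax ds (n - k + 1) (pvBestB ds n k) := by
  have ht : n - k + 1 = 1 + (((n - k).toNat : Nat) : Int) := by omega
  rw [pvBestB, ht]
  exact argmax_aux ds (n - k).toNat

-- the A-side fold equals the reversed-stack model
theorem bridge_while (d : Int) (rs : List Int) (b : Int) :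
    pvWhileA d rs.reverse b = ((popT d rs b).1.reverse, (popT d rs b).2) := by
  induction rs generalizing b with
  | nil => rw [pvWhileA]; simp [popT]
  | cons t rs ih =>
    rw [pvWhileA]
    have hrev : (t :: rs).reverse = rs.reverse ++ [t] := by simp
    by_cases hc : b ≠ 0 ∧ t < d
    · rw [dif_pos (by
        refine ⟨hc.1, by simp, ?_⟩
        rw [hrev, PySem.List.pyGetD_neg_one_append_singleton]
        exact hc.2)]
      rw [hrev, List.dropLast_concat]
      rw [show popT d (t :: rs) b = popT d rs (b - 1) from by simp [popT, hc]]
      exact ih (b - 1)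
    · rw [dif_neg (by
        rw [hrev, PySem.List.pyGetD_neg_one_append_singleton]
        intro h
        exact hc ⟨h.1, h.2.2⟩)]
      rw [show popT d (t :: rs) b = (t :: rs, b) from by simp [popT]; intro h1 h2; exact absurd ⟨h1, h2⟩ hc]

theorem bridge_fold (ys rs : List Int) (b : Int) :
    ys.foldl pvStepA (rs.reverse, b) = ((runT ys rs b).1.reverse, (runT ys rs b).2) := by
  induction ys generalizing rs b with
  | nil => simp [runT]
  | cons d ys ih =>
    simp only [List.foldl_cons, runT]
    have hstep : pvStepA (rs.reverse, b) d
        = ((d :: (popT d rs b).1).reverse, (popT d rs b).2) := by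
      simp [pvStepA, bridge_while]
    rw [hstep]
    exact ih (d :: (popT d rs b).1) (popT d rs b).2

theorem A_unfold (ds : List Int) (k : Int) (h0 : 0 ≤ k) (h1 : k ≤ ds.length) :
    max_k_digit_subsequence ds k
      = ((runT ds [] ((ds.length : Int) - k)).1.reverse.take k.toNat) := by
  unfold max_k_digit_subsequence
  rw [if_neg (not_not_intro ⟨h0, h1⟩)]
  by_cases hk : k = 0
  · subst hk; simp
  · rw [if_neg hk]
    rw [show ds.foldl pvStepA ([], (ds.length : Int) - k)
        = ((runT ds [] ((ds.length : Int) - k)).1.reverse, (runT ds [] ((ds.length : Int) - k)).2)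
      from by simpa using bridge_fold ds [] ((ds.length : Int) - k)]

-- main decomposition of A's stack run: first chosen digit, then the run on the suffix
theorem A_decomp (ds : List Int) (k : Int) (j : Int)
    (h0 : 0 < k) (h1 : k ≤ ds.length) (hj : IsLMax ds ((ds.length : Int) - k + 1) j) :
    (runT ds [] ((ds.length : Int) - k)).1.reverse.take k.toNat
      = PySem.List.pyGetD ds j 0 ::
        (runT (ds.drop (j + 1).toNat) [] (((ds.length : Int)) - k - j)).1.reverse.take (k - 1).toNat := by
  obtain ⟨hj0, hjW, hmax, hstrict⟩ := hj
  have hjcast : ((j.toNat : Nat) : Int) = j := Int.toNat_of_nonneg hj0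
  set jn := j.toNat with hjndef
  have hjn_lt : jn < ds.length := by omega
  have hget : ∀ (i : Nat) (hi : i < ds.length), PySem.List.pyGetD ds ((i : Nat) : Int) 0 = ds[i]'hi := by
    intro i hi
    rw [PySem.List.pyGetD_natCast]
    exact List.getD_eq_getElem ds 0 hi
  have hm : PySem.List.pyGetD ds j 0 = ds[jn] := by rw [← hjcast]; exact hget jn hjn_lt
  have hsplit : ds = ds.take jn ++ ds[jn] :: ds.drop (jn + 1) := by
    conv_lhs => rw [← List.take_append_drop jn ds]
    rw [List.drop_eq_getElem_cons hjn_lt]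
  have hpre : ∀ x ∈ ds.take jn, x < ds[jn] := by
    intro x hx
    obtain ⟨i, hi, hxi⟩ := List.getElem_of_mem hx
    have hilt : i < jn := by simp [List.length_take] at hi; omega
    have hxeq : x = ds[i]'(by omega) := by rw [← hxi]; exact List.getElem_take
    rw [hxeq]
    have hs := hstrict (i : Int) (by positivity) (by omega)
    rw [hget i (by omega), hm] at hs
    exact hs
  have hlen_take : (ds.take jn).length = jn := by simp [List.length_take]; omega
  have h_run1 : runT ds [] ((ds.length : Int) - k)
      = runT (ds.drop (jn + 1)) [ds[jn]] ((ds.length : Int) - k - j) := by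
    nth_rewrite 1 [hsplit]
    rw [run_prefix ds[jn] (ds.take jn) (ds.drop (jn + 1)) [] ((ds.length : Int) - k) hpre
      (by simp) (by simp [hlen_take]; omega)]
    congr 1
    simp [hlen_take]
    omega
  have hcond : pvCond ds[jn] k (ds.drop (jn + 1)) := by
    apply cond_of_tail
    intro p hp hmlt
    have hplen : (ds.drop (jn + 1)).length = ds.length - (jn + 1) := by simp
    have hq : jn + 1 + p < ds.length := by omega
    have hgetp : (ds.drop (jn + 1)).getD p 0 = ds[jn + 1 + p] := by
      rw [List.getD_eq_getElem (ds.drop (jn + 1)) 0 hp]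
      exact List.getElem_drop
    rw [hgetp] at hmlt
    have hout : ¬ (((jn + 1 + p : Nat) : Int) < (ds.length : Int) - k + 1) := by
      intro hlt
      have hle := hmax ((jn + 1 + p : Nat) : Int) (by positivity) hlt
      rw [hget _ hq, hm] at hle
      omega
    push_cast at hout ⊢
    rw [hplen]
    push_cast
    omega
  have h_run2 := run_protect ds[jn] k (ds.drop (jn + 1)) [] ((ds.length : Int) - k - j)
    (by omega) (by simp only [List.length_drop, List.length_nil]; push_cast; omega) hcond
  simp only [List.nil_append] at h_run2
  rw [h_run1, h_run2]
  simp only [List.reverse_concat]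
  rw [show k.toNat = (k - 1).toNat + 1 by omega, List.take_succ_cons,
      show (j + 1).toNat = jn + 1 by omega, hm]

theorem main_aux (K : Nat) : ∀ (ds : List Int) (k : Int), k.toNat = K → 0 ≤ k → k ≤ ds.length →
    max_k_digit_subsequence ds k = pvSelRec ds k := by
  induction K with
  | zero =>
    intro ds k hk h0 h1
    have hk0 : k = 0 := by omega
    subst hk0
    simp [max_k_digit_subsequence, pvSelRec]
  | succ K ih =>
    intro ds k hk h0 h1
    have hkpos : 0 < k := by omega
    have hW : 1 ≤ (ds.length : Int) - k + 1 := by omega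
    have hlm := best_isLMax ds (ds.length : Int) k hW
    set j := pvBestB ds (ds.length : Int) k with hjdef
    have hj0 : 0 ≤ j := hlm.1
    have hjW : j < (ds.length : Int) - k + 1 := hlm.2.1
    rw [A_unfold ds k (le_of_lt hkpos) h1, A_decomp ds k j hkpos h1 hlm]
    rw [pvSelRec]
    rw [if_neg (not_not_intro ⟨le_of_lt hkpos, h1⟩), if_neg (by omega : ¬ k = 0)]
    rw [← hjdef]
    congr 1
    rw [show PySem.List.slice ds (some (j + 1)) none = ds.drop (j + 1).toNat from
      PySem.List.slice_from ds (by omega)]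
    have hys : k - 1 ≤ ((ds.drop (j + 1).toNat).length : Int) := by
      simp [List.length_drop]; omega
    rw [← ih (ds.drop (j + 1).toNat) (k - 1) (by omega) (by omega) hys]
    rw [A_unfold _ (k - 1) (by omega) hys]
    have hbud : ((ds.drop (j + 1).toNat).length : Int) - (k - 1) = (ds.length : Int) - k - j := by
      simp [List.length_drop]; omega
    rw [hbud]


theorem getShift (ds : List Int) (s r : Int) (hs : 0 ≤ s) (hr : 0 ≤ r)
    (h : s + r < (ds.length : Int)) :
    PySem.List.pyGetD ds (s + r) 0 = PySem.List.pyGetD (ds.drop s.toNat) r 0 := by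
  have h1 : s + r = ((s.toNat + r.toNat : Nat) : Int) := by omega
  have h2 : r = ((r.toNat : Nat) : Int) := by omega
  rw [h1, h2, PySem.List.pyGetD_natCast, PySem.List.pyGetD_natCast]
  simp only [Int.toNat_natCast]
  have hb : s.toNat + r.toNat < ds.length := by omega
  have hb2 : r.toNat < (ds.drop s.toNat).length := by simp [List.length_drop]; omega
  rw [List.getD_eq_getElem ds 0 hb, List.getD_eq_getElem _ 0 hb2]
  exact (List.getElem_drop).symm

theorem bestFrom_shift (ds : List Int) (s : Int) (t : Nat) (hs : 0 ≤ s)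
    (hts : s + (t : Int) < (ds.length : Int)) :
    pvBestFrom ds s (s + 1 + (t : Int))
      = s + (PySem.List.pyRange 1 (1 + (t : Int)) 1).foldl
          (fun best j =>
            if PySem.List.pyGetD (ds.drop s.toNat) j 0 >
                PySem.List.pyGetD (ds.drop s.toNat) best 0 then j else best) 0 := by
  induction t with
  | zero =>
    simp only [pvBestFrom, Nat.cast_zero, add_zero]
    rw [PySem.List.pyRange_one_eq_nil (le_refl (s + 1)),
        PySem.List.pyRange_one_eq_nil (le_refl 1)]
    simp
  | succ t ih =>
    obtain ⟨hb0, hb1, _, _⟩ := argmax_aux (ds.drop s.toNat) t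
    simp only [pvBestFrom] at ih ⊢
    rw [show s + 1 + ((t + 1 : Nat) : Int) = (s + 1 + (t : Int)) + 1 by push_cast; ring,
        show (1 : Int) + ((t + 1 : Nat) : Int) = (1 + (t : Int)) + 1 by push_cast; ring,
        PySem.List.pyRange_one_succ_right (by omega),
        PySem.List.pyRange_one_succ_right (by omega),
        List.foldl_append, List.foldl_append, List.foldl_cons, List.foldl_cons,
        List.foldl_nil, List.foldl_nil]
    rw [ih (by push_cast at hts ⊢; omega)]
    rw [show s + 1 + (t : Int) = s + (1 + (t : Int)) by ring,
        getShift ds s (1 + (t : Int)) hs (by omega) (by push_cast at hts ⊢; omega),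
        getShift ds s _ hs hb0 (by push_cast at hts ⊢; omega)]
    split_ifs <;> omega

theorem loop_eq (ds : List Int) (k : Int) (c : Nat) :
    ∀ (s : Int) (acc : List Int), 0 ≤ s → s + (c : Int) ≤ (ds.length : Int) →
    ((PySem.List.pyRange (k - (c : Int)) k 1).foldl (pvStepB ds (ds.length : Int) k) (acc, s)).1
      = acc ++ pvSelRec (ds.drop s.toNat) ((c : Nat) : Int) := by
  induction c with
  | zero =>
    intro s acc hs hsc
    rw [show k - ((0 : Nat) : Int) = k by norm_num, PySem.List.pyRange_one_eq_nil (le_refl k),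
        List.foldl_nil, pvSelRec]
    simp
  | succ c ih =>
    intro s acc hs hsc
    have hsnat : ((s.toNat : Nat) : Int) = s := Int.toNat_of_nonneg hs
    set t : Nat := ds.length - s.toNat - (c + 1) with htdef
    have ht : (t : Int) = (ds.length : Int) - s - (c : Int) - 1 := by
      push_cast at hsc ⊢; omega
    obtain ⟨hb0, hb1, _, _⟩ := argmax_aux (ds.drop s.toNat) t
    have hlt : k - ((c + 1 : Nat) : Int) < k := by push_cast; omega
    rw [PySem.List.pyRange_one_cons hlt, List.foldl_cons]
    have hstep : pvStepB ds (ds.length : Int) k (acc, s) (k - ((c + 1 : Nat) : Int))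
        = (acc ++ [PySem.List.pyGetD ds
            (s + (PySem.List.pyRange 1 (1 + (t : Int)) 1).foldl
              (fun best j =>
                if PySem.List.pyGetD (ds.drop s.toNat) j 0 >
                    PySem.List.pyGetD (ds.drop s.toNat) best 0 then j else best) 0) 0],
           (s + (PySem.List.pyRange 1 (1 + (t : Int)) 1).foldl
              (fun best j =>
                if PySem.List.pyGetD (ds.drop s.toNat) j 0 >
                    PySem.List.pyGetD (ds.drop s.toNat) best 0 then j else best) 0) + 1) := by
      simp only [pvStepB]
      rw [show (ds.length : Int) - (k - (k - ((c + 1 : Nat) : Int))) + 1 = s + 1 + (t : Int) by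
            push_cast at ht ⊢; omega,
          bestFrom_shift ds s t hs (by omega)]
    rw [hstep]
    set bRel := (PySem.List.pyRange 1 (1 + (t : Int)) 1).foldl
      (fun best j =>
        if PySem.List.pyGetD (ds.drop s.toNat) j 0 >
            PySem.List.pyGetD (ds.drop s.toNat) best 0 then j else best) 0 with hbRel
    rw [show k - ((c + 1 : Nat) : Int) + 1 = k - ((c : Nat) : Int) by push_cast; ring]
    rw [ih (s + bRel + 1) _ (by omega) (by omega)]
    -- unfold pvSelRec on the suffix
    conv_rhs => rw [pvSelRec]
    rw [if_neg (not_not_intro ⟨by positivity, by simp [List.length_drop]; omega⟩),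
        if_neg (by push_cast; omega : ¬ ((c + 1 : Nat) : Int) = 0)]
    rw [show pvBestB (ds.drop s.toNat) ((ds.drop s.toNat).length : Int) ((c + 1 : Nat) : Int)
          = bRel from by
        rw [pvBestB, show ((ds.drop s.toNat).length : Int) - ((c + 1 : Nat) : Int) + 1
              = 1 + (t : Int) by simp [List.length_drop]; omega]]
    show acc ++ [PySem.List.pyGetD ds (s + bRel) 0]
          ++ pvSelRec (ds.drop (s + bRel + 1).toNat) ((c : Nat) : Int)
        = acc ++ (PySem.List.pyGetD (ds.drop s.toNat) bRel 0 ::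
            pvSelRec (PySem.List.slice (ds.drop s.toNat) (some (bRel + 1)) none)
              (((c + 1 : Nat) : Int) - 1))
    rw [show PySem.List.slice (ds.drop s.toNat) (some (bRel + 1)) none
          = (ds.drop s.toNat).drop (bRel + 1).toNat from
        PySem.List.slice_from (ds.drop s.toNat) (by omega)]
    rw [List.drop_drop]
    rw [show s.toNat + (bRel + 1).toNat = (s + bRel + 1).toNat by omega]
    rw [show PySem.List.pyGetD (ds.drop s.toNat) bRel 0 = PySem.List.pyGetD ds (s + bRel) 0 from
        (getShift ds s bRel hs hb0 (by omega)).symm]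
    rw [show ((c + 1 : Nat) : Int) - 1 = ((c : Nat) : Int) by push_cast; ring]
    simp

theorem alt_eq_selRec (ds : List Int) (k : Int) (h0 : 0 ≤ k) (h1 : k ≤ (ds.length : Int)) :
    max_k_digit_subsequence_alt ds k = pvSelRec ds k := by
  unfold max_k_digit_subsequence_alt
  rw [if_neg (not_not_intro ⟨h0, h1⟩)]
  have hmain := loop_eq ds k k.toNat 0 [] (le_refl 0) (by omega)
  rw [show k - ((k.toNat : Nat) : Int) = 0 by omega] at hmain
  simp only [Int.toNat_zero, List.drop_zero, List.nil_append] at hmain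
  rw [hmain, Int.toNat_of_nonneg h0]

-- ===== VERDICT (by name: the statement is the Claim_ definition above) =====
theorem max_k_digit_subsequence_spec : Claim_equal_max_k_digit_subsequence := by
  intro ds k _ hpre
  unfold Spec_max_k_digit_subsequence
  rw [alt_eq_selRec ds k hpre.1 hpre.2]
  exact main_aux k.toNat ds k rfl hpre.1 hpre.2
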